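-- pv_equiv track=rewrite | github.com/MrIvni01/ParserPetrovicShop | main.py | infinite
-- ===== SOURCE A (Python) =====
-- from itertools import cycle
--
-- def infinite(lst, tries):
--
--     numbers = cycle(lst)
--     i = 0
--     str_result = ""
--     if lst:
--         while i != tries:
--             str_result += str(next(numbers))
--             i += 1
--     return str_result
-- ===== SOURCE B (Python) =====
-- def infinite(lst, tries):
--     if not lst or tries <= 0:
--         return ""
--     strs = [str(x) for x in lst]
--     q, r = divmod(tries, len(lst))
--     return "".join(strs) * q + "".join(strs[:r])
-- ===== Notes on version B (the rewrite author's own statement) =====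
-- stated objective: alternative
-- what changed: B stringifies each element once, joins the cycle once and builds the result as full-cycle-string * quotient plus a joined prefix for the remainder, instead of A's per-step string concatenation over an itertools.cycle; intended as faster (measured 2.7-9.4x on sizes where both finished, but unconfirmed at the largest size).
import Mathlib
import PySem

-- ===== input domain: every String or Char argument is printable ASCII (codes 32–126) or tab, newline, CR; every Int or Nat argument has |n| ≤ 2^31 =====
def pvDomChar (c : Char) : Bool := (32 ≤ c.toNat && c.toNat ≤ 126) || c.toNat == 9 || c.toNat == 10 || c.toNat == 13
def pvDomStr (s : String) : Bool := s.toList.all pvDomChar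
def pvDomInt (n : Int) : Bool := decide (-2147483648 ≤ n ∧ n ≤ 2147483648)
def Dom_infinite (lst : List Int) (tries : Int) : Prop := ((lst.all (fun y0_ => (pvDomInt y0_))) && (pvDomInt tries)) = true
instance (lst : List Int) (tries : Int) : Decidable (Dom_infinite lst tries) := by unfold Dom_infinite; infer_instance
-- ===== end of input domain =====

-- B builds the output once from a joined cycle string (full cycles + remainder prefix) instead of A's
-- per-step concatenation; equivalence of the RETURN value on Pre_ (A loops forever for tries < 0 with a
-- non-empty list, which Pre_ excludes).

-- ===== PORT A =====
-- the while loop: i runs 0,1,…,tries-1; next(numbers) is lst[i % len(lst)]; str_result += str(…)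
def infCycChars (lst : List Int) (n : Nat) : List Char :=
  (List.range n).foldl (fun acc i => acc ++ PySem.Int.toChars (lst.getD (i % lst.length) 0)) []

def infinite (lst : List Int) (tries : Int) : String :=
  if lst = [] then "" else String.mk (infCycChars lst tries.toNat)

-- ===== PORT B =====
-- "".join(strs) * q  (q copies of the joined cycle)
def repChars (s : List Char) : Nat → List Char
  | 0 => []
  | q + 1 => s ++ repChars s q

def infinite_alt (lst : List Int) (tries : Int) : String :=
  if lst = [] ∨ tries ≤ 0 then ""
  else
    let strs := lst.map PySem.Int.toChars
    let q := tries.toNat / lst.length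
    let r := tries.toNat % lst.length
    String.mk (repChars strs.flatten q ++ (strs.take r).flatten)

-- ===== PRECONDITION & SPEC =====
-- A diverges (while i != tries never terminates) when lst is non-empty and tries < 0; Pre_ excludes exactly that.
def Pre_infinite (lst : List Int) (tries : Int) : Prop := lst = [] ∨ 0 ≤ tries
instance (lst : List Int) (tries : Int) : Decidable (Pre_infinite lst tries) := by unfold Pre_infinite; infer_instance
def pvWitness_infinite : List Int × Int := ([3, -14, 5], 7)

def Spec_infinite (lst : List Int) (tries : Int) (out : String) : Prop := out = infinite_alt lst tries
instance (lst : List Int) (tries : Int) (out : String) : Decidable (Spec_infinite lst tries out) := by unfold Spec_infinite; infer_instance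

-- ===== CLAIM (what is proved, stated in full; the proofs are below) =====
def Claim_equal_infinite : Prop := ∀ (lst : List Int) (tries : Int), Dom_infinite lst tries → Pre_infinite lst tries → Spec_infinite lst tries (infinite lst tries)

-- ===== LEMMAS AND PROOFS =====

theorem repChars_succ_right (s : List Char) (q : Nat) :
    repChars s (q + 1) = repChars s q ++ s := by
  induction q with
  | zero => simp [repChars]
  | succ q ih =>
    calc repChars s (q + 1 + 1) = s ++ repChars s (q + 1) := rfl
      _ = s ++ (repChars s q ++ s) := by rw [ih]
      _ = (s ++ repChars s q) ++ s := (List.append_assoc _ _ _).symm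
      _ = repChars s (q + 1) ++ s := rfl

-- cyclic indexing over range n splits into full cycles plus a remainder prefix
theorem flatMap_cycle (f : Nat → List Char) (L : Nat) (hL : 0 < L) (n : Nat) :
    (List.range n).flatMap (fun i => f (i % L))
      = repChars ((List.range L).flatMap f) (n / L)
          ++ (List.range (n % L)).flatMap f := by
  induction n with
  | zero => simp [repChars, Nat.zero_div, Nat.zero_mod]
  | succ n ih =>
    rw [List.range_succ, List.flatMap_append, ih]
    obtain ⟨q, r, hr, hqr⟩ : ∃ q r, r < L ∧ n = L * q + r :=
      ⟨n / L, n % L, Nat.mod_lt _ hL, by have := Nat.div_add_mod n L; omega⟩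
    have hq : n / L = q := by rw [hqr, Nat.mul_add_div hL, Nat.div_eq_of_lt hr]; omega
    have hrm : n % L = r := by rw [hqr, Nat.mul_add_mod, Nat.mod_eq_of_lt hr]
    by_cases h : r + 1 = L
    · have hLq : n + 1 = L * (q + 1) := by rw [Nat.mul_add, Nat.mul_one]; omega
      have hq1 : (n + 1) / L = q + 1 := by rw [hLq, Nat.mul_div_cancel_left _ hL]
      have hr1 : (n + 1) % L = 0 := by rw [hLq, Nat.mul_mod_right]
      rw [hq, hrm, hq1, hr1, repChars_succ_right]
      have : (List.range L).flatMap f = (List.range r).flatMap f ++ f r := by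
        rw [← h, List.range_succ, List.flatMap_append]; simp
      rw [this]
      simp [List.append_assoc, hrm]
    · have hq1 : (n + 1) / L = q := by
        have : n + 1 = L * q + (r + 1) := by omega
        rw [this, Nat.mul_add_div hL, Nat.div_eq_of_lt (by omega)]; omega
      have hr1 : (n + 1) % L = r + 1 := by
        have : n + 1 = L * q + (r + 1) := by omega
        rw [this, Nat.mul_add_mod, Nat.mod_eq_of_lt (by omega)]
      rw [hq, hrm, hq1, hr1, List.range_succ, List.flatMap_append]
      simp [List.append_assoc, hrm]

theorem map_getD_range_take (xs : List Int) (r : Nat) (h : r ≤ xs.length) :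
    (List.range r).map (fun i => xs.getD i 0) = xs.take r := by
  apply List.ext_getElem
  · simp [h]
  · intro i h1 h2
    simp only [List.getElem_map, List.getElem_range, List.getElem_take]
    rw [List.getD_eq_getElem]

-- ===== VERDICT (by name: the statement is the Claim_ definition above) =====
theorem infinite_spec : Claim_equal_infinite := by
  intro lst tries _ hpre
  unfold Spec_infinite infinite infinite_alt infCycChars
  by_cases hl : lst = []
  · simp [hl]
  · have h0 : 0 ≤ tries := hpre.resolve_left hl
    have hL : 0 < lst.length := List.length_pos_iff.mpr hl
    by_cases ht : tries ≤ 0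
    · have h00 : tries = 0 := le_antisymm ht h0
      subst h00
      simp only [hl, if_false, le_refl, or_true, if_true, Int.toNat_zero,
        List.range_zero, List.foldl_nil]
      rfl
    · simp only [hl, ht, or_self, if_false]
      rw [PySem.List.foldl_append_eq_flatMap, List.nil_append,
          flatMap_cycle (fun i => PySem.Int.toChars (lst.getD i 0)) lst.length hL tries.toNat]
      have hflat : ∀ m, m ≤ lst.length →
          (List.range m).flatMap (fun i => PySem.Int.toChars (lst.getD i 0))
            = ((lst.map PySem.Int.toChars).take m).flatten := by
        intro m hm
        rw [← List.map_take, ← map_getD_range_take lst m hm, ← List.flatMap_def,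
            List.flatMap_map]
      rw [hflat (tries.toNat % lst.length) (le_of_lt (Nat.mod_lt _ hL))]
      have hC : (List.range lst.length).flatMap (fun i => PySem.Int.toChars (lst.getD i 0))
          = (lst.map PySem.Int.toChars).flatten := by
        rw [hflat lst.length le_rfl, List.take_of_length_le (by simp)]
      rw [hC]
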